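/- GENERATED by mk_final_copies.py from the proof of the farm's unit `_start_vorbis` (farm:_start_vorbis.1: Proof.lean) as the
   re-elaboration sweep compiled it — do not edit. -/
import Vorbis.Spec.Units.start_vorbis
import Vorbis.Spec.TopCheck

open X86 X86.User Asan Vorbis Vorbis.Spec

set_option maxRecDepth 4000
set_option maxHeartbeats 4000000

namespace Vorbis.Spec.start_vorbis

/-- The windows `run_ctors` may write besides its stack: the shadow bytes of the six registered globals' slots, as a literal
list (`registerWrites` evaluated for the descriptor table of this image), so that the frame tactics see through the footprint. -/
theorem sv_rc_writes (u : State) :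
    (runCtorsSpec rt).writes u =
      [⟨0xC242C0, 0xC242C8⟩, ⟨0xC240C0, 0xC240C8⟩, ⟨0xC240C8, 0xC240D0⟩, ⟨0xC240D0, 0xC24154⟩, ⟨0xC24158, 0xC24160⟩,
       ⟨0xC24380, 0xC24404⟩] :=
  id rfl

/-- `.init_array` is still in a memory that agrees with the start memory on the image's data (0x121500 is read). -/
theorem sv_ctorIn_eqOn {mem mem' : Mem} (h : CtorIn mem rt.sym) (he : Mem.EqOn 0x100000 0x700000 mem mem') :
    CtorIn mem' rt.sym := by
  obtain ⟨h1, h2⟩ := h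
  refine ⟨h1, ?_⟩
  have e0 : rt.sym.initArrayStart = 0x121500 := by decide
  rw [e0] at h2 ⊢
  rw [he.readLE _ 8 (by decide) (by decide) (by decide)]
  exact h2

/-- The descriptor table is still in a memory that agrees with the start memory on the image's data. -/
theorem sv_descsIn_eqOn {mem mem' : Mem} (h : DescsIn mem rt.table rt.descs) (he : Mem.EqOn 0x100000 0x700000 mem mem') :
    DescsIn mem' rt.table rt.descs := by
  intro i hi
  have hlen : rt.descs.length = 6 := by decide
  have htab : rt.table = 0x1217c0 := by decide
  have hi6 : i < 6 := by omega
  obtain ⟨h1, h2, h3⟩ := h i hi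
  have k1 : (UInt64.ofNat (rt.table + 64 * i)).toNat = rt.table + 64 * i := by
    rw [UInt64.toNat_ofNat']
    omega
  have k2 : (UInt64.ofNat (rt.table + 64 * i + 8)).toNat = rt.table + 64 * i + 8 := by
    rw [UInt64.toNat_ofNat']
    omega
  have k3 : (UInt64.ofNat (rt.table + 64 * i + 16)).toNat = rt.table + 64 * i + 16 := by
    rw [UInt64.toNat_ofNat']
    omega
  refine ⟨?_, ?_, ?_⟩
  · rw [he.readLE _ 8 (by omega) (by omega) (by omega)]
    exact h1
  · rw [he.readLE _ 8 (by omega) (by omega) (by omega)]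
    exact h2
  · rw [he.readLE _ 8 (by omega) (by omega) (by omega)]
    exact h3

/-- SH7 for `log2_4` and `range_list` in a memory that agrees with the start memory on the image's data. -/
theorem sv_consts_eqOn {mem mem' : Mem} (h : Consts mem) (he : Mem.EqOn 0x100000 0x700000 mem mem') : Consts mem' := by
  refine h.kept ⟨?_, by decide⟩ ⟨?_, by decide⟩
  · exact he.mono (by decide) (by decide)
  · exact he.mono (by decide) (by decide)

/-- The `int` argument `len` of decode_all: the parameter word, at most 1FF000H, read as a signed 32-bit number. -/
theorem sv_s32_ofNat (n : Nat) (h : n ≤ 0x1FF000) : s32 (UInt64.ofNat n) = (n : Int) := by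
  rw [s32_eq_argInt, argInt_def, UInt64.toNat_ofNat']
  rcases sint32_cases (n % 2 ^ 64 % 2 ^ 32) with ⟨_, e⟩ | ⟨c, _⟩
  · rw [e]
    omega
  · omega

end Vorbis.Spec.start_vorbis

/-- `_start_vorbis` (the stub, 13 instructions; c/start.S) reaches `vorbis_exit` from a start state `Top.StartOK len u`:
`call run_ctors` (afterwards `StartOK.registered` gives the shadow layer; the image's data and the parameter block are off
its footprint), the six parameter loads, `call decode_all` (its precondition: the six values, and `start_fixedLive` /
`start_arenaFree` / `start_offText` of Vorbis/Spec/TopCheck.lean), three unchecked stores of the result, RIP = `L.exit`. -/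
theorem Vorbis.Spec.Worked.start_vorbis_ok : Vorbis.Spec.start_vorbis.Statement := by
  intro Lay hLay μ hμ u₀ hcode h_rc h_da len u hst hco
  -- the start state's facts under the names the walker reads
  have w_rip : u.rip = Vorbis.L._start_vorbis.entry := hst.rip
  have c_rsp : u.reg .rsp = 0x800000 := hst.rsp
  have w_eq : Mem.EqOn Vorbis.L.textLo Vorbis.L.textHi u₀.mem u.mem := hco
  have hdf : u.flags .df = false := (show abiInv _ from hst.inv).1
  have hmx : u.mxcsr &&& 0x1F80 = 0x1F80 := (show abiInv _ from hst.inv).2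
  have hsse := Vorbis.sseOK_of_abiInv hst.inv
  have w_kept : RegsKept [.rsp] u u := RegsKept.refl _ _
  have hda := h_da (Vorbis.Globals.objs ++ initialObjs len) [] len
  -- 0x100000: call run_ctors
  u_walk hcode [hμ.vendor] span [Vorbis.L.textLo, Vorbis.L.textHi] side (v_side)
  case call_inv =>
    v_inv
  case pre_100000 =>
    have hdata : Mem.EqOn 0x100000 0x700000 u.mem s_100000.mem := by
      rw [w_mem]
      exact Mem.EqOn.writeLE _ _ _ _ _ _ (by decide) (by decide)
    exact ⟨Vorbis.Spec.start_vorbis.sv_ctorIn_eqOn hst.ctor hdata,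
      Vorbis.Spec.start_vorbis.sv_descsIn_eqOn hst.descs hdata, Vorbis.Globals.descs_ok⟩
  -- 0x100005: the state run_ctors returned
  v_after_call w_rsp_100000 w_mem_100000
  simp only [Vorbis.Spec.start_vorbis.sv_rc_writes] at w_same
  -- the image's data and the parameter block read as in the start state
  have hdataR : Mem.EqOn 0x100000 0x700000 u.mem s_100000r.mem := by
    u_memnorm
    u_eqon
  have hshR : Mem.EqOn 0xC00000 0xE00000 u.mem s_100000.mem := by
    rw [w_mem_100000]
    exact Mem.EqOn.writeLE _ _ _ _ _ _ (by decide) (by decide)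
  have p_in : s_100000r.mem.readLE 0x1FF000 8 = 0x200000 := by
    rw [hdataR.readLE _ 8 (by decide) (by decide) (by decide)]
    exact hst.param_in
  have p_len : s_100000r.mem.readLE 0x1FF008 8 = len := by
    rw [hdataR.readLE _ 8 (by decide) (by decide) (by decide)]
    exact hst.param_len
  have p_out : s_100000r.mem.readLE 0x1FF010 8 = 0x400000 := by
    rw [hdataR.readLE _ 8 (by decide) (by decide) (by decide)]
    exact hst.param_out
  have p_cap : s_100000r.mem.readLE 0x1FF018 8 = 0x300000 := by
    rw [hdataR.readLE _ 8 (by decide) (by decide) (by decide)]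
    exact hst.param_cap
  have p_arena : s_100000r.mem.readLE 0x1FF030 8 = 0x800000 := by
    rw [hdataR.readLE _ 8 (by decide) (by decide) (by decide)]
    exact hst.param_arena
  have p_alen : s_100000r.mem.readLE 0x1FF038 8 = 0x400000 := by
    rw [hdataR.readLE _ 8 (by decide) (by decide) (by decide)]
    exact hst.param_arena_len
  have hpostR : Mem.EqOn 0xC00000 0xE00000 (registerMem s_100000.mem rt.descs) s_100000r.mem := w_post
  clear w_same w_post
  -- 0x100005 … 0x100035: the six parameter loads, call decode_all
  u_walk hcode [hμ.vendor] span [Vorbis.L.textLo, Vorbis.L.textHi] side (v_side)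
  case call_inv =>
    v_inv
  case pre_100035 =>
    -- the push of the return address went to the stack: off the shadow, off the image's data
    have hsh35 : Mem.EqOn 0xC00000 0xE00000 s_100000r.mem s_100035.mem := by
      rw [w_mem]
      exact Mem.EqOn.writeLE _ _ _ _ _ _ (by decide) (by decide)
    have hdata35 : Mem.EqOn 0x100000 0x700000 s_100000r.mem s_100035.mem := by
      rw [w_mem]
      exact Mem.EqOn.writeLE _ _ _ _ _ _ (by decide) (by decide)
    -- SH5: the shadow layer after the registration of the globals, the clean stack ending at 800000H = rsp + 8
    have hinv : ShadowInv (Vorbis.Globals.objs ++ initialObjs len) [] ((s_100035.reg .rsp).toNat + 8) s_100035.mem := by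
      rw [w_rsp]
      exact hst.registered s_100000.mem s_100035.mem hshR (hpostR.trans hsh35)
    have hrsi : s32 (s_100035.reg .rsi) = (len : Int) := by
      rw [w_rsi]
      exact Vorbis.Spec.start_vorbis.sv_s32_ofNat len hst.len_le
    have hr9 : s32 (s_100035.reg .r9) = 0x400000 := by
      rw [w_r9]
      decide
    exact ⟨⟨hinv, Vorbis.Spec.TopCheck.start_offText len⟩, w_rdi, hrsi, hst.len_le, w_rdx, w_rcx, w_r8, hr9,
      Vorbis.Spec.TopCheck.start_fixedLive len, Vorbis.Spec.TopCheck.start_arenaFree len hst.len_le,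
      Vorbis.Spec.start_vorbis.sv_consts_eqOn hst.consts (hdataR.trans hdata35)⟩
  -- 0x10003a: the state decode_all returned; its result is any word
  v_after_call w_rsp_100035 w_mem_100035
  obtain ⟨z, w_rax⟩ : ∃ z, s_100035r.reg .rax = z := ⟨_, rfl⟩
  clear w_same w_post
  -- 0x10003a … 0x100056: the three unchecked stores of the result, `vorbis_exit: hlt` not yet executed
  u_walk hcode [hμ.vendor] until [Vorbis.L.exit] span [Vorbis.L.textLo, Vorbis.L.textHi] side (v_side)
  -- 0x100056: EXIT
  refine ReachVia.done ?_
  exact w_rip
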